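-- pv_equiv track=rewrite | github.com/FearTheDeer9/AmortizedBayesianOptimization | src/causal_bayes_opt/surrogate/structure_encoding.py | _get_reachable_variables
-- ===== SOURCE A (Python) =====
-- from typing import Dict, List, Set, Tuple, Any, Optional
--
-- def _get_reachable_variables(
--     start_var: str,
--     adjacency: Dict[str, Set[str]],
--     reverse: bool = False
-- ) -> Set[str]:
--     """Get all variables reachable from start_var using BFS."""
--     reachable = set()
--     queue = [start_var]
--     visited = {start_var}
--
--     while queue:
--         current = queue.pop(0)
--
--         neighbors = adjacency.get(current, set())
--         for neighbor in neighbors: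
--             if neighbor not in visited:
--                 visited.add(neighbor)
--                 reachable.add(neighbor)
--                 queue.append(neighbor)
--
--     return reachable
-- ===== SOURCE B (Python) =====
-- def _get_reachable_variables(start_var, adjacency, reverse=False):
--     """Naive fixed-point closure (Datalog-style): repeatedly rescan every known
--     node and add its unseen neighbors, until a full pass adds nothing.
--     No queue/frontier is maintained at all."""
--     known = [start_var]          # discovery order
--     member = {start_var}
--     changed = True
--     while changed:
--         changed = False
--         for node in list(known):
--             for neighbor in adjacency.get(node, set()):
--                 if neighbor not in member:
--                     known.append(neighbor)
--                     member.add(neighbor)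
--                     changed = True
--     return set(known[1:])
-- ===== Notes on version B (the rewrite author's own statement) =====
-- stated objective: alternative
-- what changed: Replaces A's worklist BFS (FIFO queue, each node dequeued and scanned once) with a naive fixed-point closure: no queue at all; every pass rescans the entire set of known nodes and adds unseen neighbors, repeating until a full pass adds nothing (Datalog-style naive evaluation).
import Mathlib
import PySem

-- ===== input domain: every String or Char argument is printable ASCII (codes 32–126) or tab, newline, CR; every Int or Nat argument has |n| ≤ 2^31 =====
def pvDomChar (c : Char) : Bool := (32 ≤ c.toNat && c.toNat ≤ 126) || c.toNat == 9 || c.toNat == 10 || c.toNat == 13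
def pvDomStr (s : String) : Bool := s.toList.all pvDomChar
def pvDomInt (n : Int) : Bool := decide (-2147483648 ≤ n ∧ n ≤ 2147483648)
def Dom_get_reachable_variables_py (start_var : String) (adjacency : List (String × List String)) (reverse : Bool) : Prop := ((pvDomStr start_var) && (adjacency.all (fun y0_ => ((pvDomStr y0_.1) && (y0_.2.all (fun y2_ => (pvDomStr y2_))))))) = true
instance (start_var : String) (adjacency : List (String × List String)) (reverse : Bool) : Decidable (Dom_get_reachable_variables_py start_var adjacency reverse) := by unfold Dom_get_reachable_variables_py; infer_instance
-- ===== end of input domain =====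

-- B replaces A's FIFO-queue BFS with a queue-free naive fixed-point closure:
-- each pass rescans the whole list of known nodes and adds unseen neighbors,
-- repeating until a pass adds nothing (objective: alternative algorithm).
-- The `reverse` parameter is unused by both programs, exactly as in the Python.

-- shared lookup primitive: adjacency.get(c, set())
def pvAdjGet (adjacency : List (String × List String)) (c : String) : List String :=
  (PySem.Dict.mk adjacency).getD c []

-- all strings occurring as neighbours anywhere in the adjacency (for the termination measure)
def pvNodes (adjacency : List (String × List String)) : List String :=
  adjacency.flatMap (fun p => p.2)

-- termination measure for both loops: unvisited potential neighbours + pending work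
def pvMeasure (adjacency : List (String × List String)) (visited queue : List String) : Nat :=
  ((pvNodes adjacency).toFinset \ visited.toFinset).card + queue.length

-- the new elements a scan of `ns` appends when `visited = v` (proof-side characterisation)
def pvNew (v : List String) : List String → List String
  | [] => []
  | nb :: ns => if v.contains nb then pvNew v ns else nb :: pvNew (v ++ [nb]) ns

-- the new elements sequential processing of the nodes `f` appends when `visited = v`
def pvNews (adjacency : List (String × List String)) (v : List String) : List String → List String
  | [] => []
  | c :: f =>
      let n := pvNew v (pvAdjGet adjacency c)
      n ++ pvNews adjacency (v ++ n) f

theorem pvNew_mem {v ns : List String} {x : String} (h : x ∈ pvNew v ns) :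
    x ∈ ns ∧ x ∉ v := by
  induction ns generalizing v with
  | nil => simp [pvNew] at h
  | cons nb ns ih =>
      simp only [pvNew] at h
      split at h
      · rcases ih h with ⟨h1, h2⟩; exact ⟨List.mem_cons_of_mem _ h1, h2⟩
      · rename_i hc
        rcases List.mem_cons.mp h with rfl | h'
        · exact ⟨List.mem_cons_self, fun hv => hc (List.contains_iff_mem.mpr hv)⟩
        · rcases ih h' with ⟨h1, h2⟩
          refine ⟨List.mem_cons_of_mem _ h1, fun hv => h2 ?_⟩
          exact List.mem_append_left _ hv

theorem pvNew_nodup (v ns : List String) : (pvNew v ns).Nodup := by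
  induction ns generalizing v with
  | nil => simp [pvNew]
  | cons nb ns ih =>
      simp only [pvNew]
      split
      · exact ih v
      · refine List.nodup_cons.mpr ⟨fun h => ?_, ih (v ++ [nb])⟩
        exact (pvNew_mem h).2 (List.mem_append_right _ (List.mem_singleton.mpr rfl))

theorem pvAdjGet_sub {adjacency : List (String × List String)} {c x : String}
    (h : x ∈ pvAdjGet adjacency c) : x ∈ pvNodes adjacency := by
  induction adjacency with
  | nil => simp [pvAdjGet, PySem.Dict.getD, PySem.Dict.get?] at h
  | cons p rest ih =>
      obtain ⟨k, vs⟩ := p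
      simp only [pvAdjGet, PySem.Dict.getD_eq_get?_getD, PySem.Dict.get?_mk_cons] at h ih
      simp only [pvNodes, List.flatMap_cons, List.mem_append]
      by_cases hk : k == c
      · rw [if_pos hk] at h; left; simpa using h
      · rw [if_neg hk] at h; right; exact ih h

theorem pvNews_mem {adjacency : List (String × List String)} {v f : List String} {x : String}
    (h : x ∈ pvNews adjacency v f) : x ∈ pvNodes adjacency ∧ x ∉ v := by
  induction f generalizing v with
  | nil => simp [pvNews] at h
  | cons c f ih =>
      simp only [pvNews, List.mem_append] at h
      rcases h with h | h
      · exact ⟨pvAdjGet_sub (pvNew_mem h).1, (pvNew_mem h).2⟩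
      · rcases ih h with ⟨h1, h2⟩
        exact ⟨h1, fun hv => h2 (List.mem_append_left _ hv)⟩

theorem pvNews_nodup (adjacency : List (String × List String)) (v f : List String) :
    (pvNews adjacency v f).Nodup := by
  induction f generalizing v with
  | nil => simp [pvNews]
  | cons c f ih =>
      simp only [pvNews]
      refine List.Nodup.append (pvNew_nodup v _) (ih _) ?_
      intro x hx hx'
      exact (pvNews_mem hx').2 (List.mem_append_right _ hx)

-- the measure drops by exactly the number of fresh discovered nodes
theorem pvMeasure_drop {adjacency : List (String × List String)} {v n : List String}
    (hn : n.Nodup) (hsub : ∀ x ∈ n, x ∈ pvNodes adjacency ∧ x ∉ v) :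
    ((pvNodes adjacency).toFinset \ (v ++ n).toFinset).card + n.length
      = ((pvNodes adjacency).toFinset \ v.toFinset).card := by
  classical
  have hsplit : (pvNodes adjacency).toFinset \ v.toFinset
      = ((pvNodes adjacency).toFinset \ (v ++ n).toFinset) ∪ n.toFinset := by
    ext x
    simp only [Finset.mem_sdiff, List.toFinset_append, Finset.mem_union, List.mem_toFinset]
    constructor
    · intro ⟨hx, hxv⟩
      by_cases hxn : x ∈ n
      · exact Or.inr hxn
      · exact Or.inl ⟨hx, fun h => h.elim hxv hxn⟩
    · rintro (⟨hx, hxvn⟩ | hxn)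
      · exact ⟨hx, fun hv => hxvn (Or.inl hv)⟩
      · rcases hsub x hxn with ⟨h1, h2⟩
        exact ⟨h1, h2⟩
  have hdisj : Disjoint ((pvNodes adjacency).toFinset \ (v ++ n).toFinset) n.toFinset := by
    refine Finset.disjoint_left.mpr ?_
    intro x hx hxn
    rcases Finset.mem_sdiff.mp hx with ⟨_, hxvn⟩
    exact hxvn (by simp only [List.toFinset_append]; exact Finset.mem_union_right _ hxn)
  have hcard : n.toFinset.card = n.length := List.toFinset_card_of_nodup hn
  rw [hsplit, Finset.card_union_of_disjoint hdisj, hcard]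

-- ===== PORT A =====  (BFS: while queue: current = queue.pop(0); scan neighbours)
def pvStepA (adjacency : List (String × List String)) (c : String)
    (visited reachable queue : List String) : List String × List String × List String :=
  (pvAdjGet adjacency c).foldl
    (fun (st : List String × List String × List String) nb =>
      if st.1.contains nb then st
      else (PySem.Set.add st.1 nb, PySem.Set.add st.2.1 nb, st.2.2 ++ [nb]))
    (visited, reachable, queue)

-- visited / queue components of one BFS step (needed by loopA's termination proof)
theorem pvStepA_fst_thd (adjacency : List (String × List String)) (c : String)
    (visited reachable queue : List String) :
    (pvStepA adjacency c visited reachable queue).1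
        = visited ++ pvNew visited (pvAdjGet adjacency c)
      ∧ (pvStepA adjacency c visited reachable queue).2.2
        = queue ++ pvNew visited (pvAdjGet adjacency c) := by
  simp only [pvStepA]
  generalize pvAdjGet adjacency c = ns
  induction ns generalizing visited reachable queue with
  | nil => simp [pvNew]
  | cons nb ns ih =>
      simp only [List.foldl_cons, pvNew]
      by_cases h : visited.contains nb
      · simp only [h, if_pos]
        exact ih visited reachable queue
      · have hnb : nb ∉ visited := fun hm => h (List.contains_iff_mem.mpr hm)
        have := ih (visited ++ [nb]) (PySem.Set.add reachable nb) (queue ++ [nb])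
        rw [if_neg h, if_neg h, PySem.Set.add_of_not_mem hnb]
        refine ⟨?_, ?_⟩
        · rw [this.1]; simp [List.append_assoc]
        · rw [this.2]; simp [List.append_assoc]

def loopA (adjacency : List (String × List String))
    (queue visited reachable : List String) : List String :=
  match queue with
  | [] => reachable
  | c :: q' =>
      let st := pvStepA adjacency c visited reachable q'
      loopA adjacency st.2.2 st.1 st.2.1
termination_by pvMeasure adjacency visited queue
decreasing_by
  rcases pvStepA_fst_thd adjacency c visited reachable q' with ⟨h1, h2⟩
  rw [h1, h2]
  simp only [pvMeasure, List.length_append, List.length_cons]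
  have := pvMeasure_drop (adjacency := adjacency) (v := visited)
    (pvNew_nodup visited (pvAdjGet adjacency c))
    (fun x hx => ⟨pvAdjGet_sub (pvNew_mem hx).1, (pvNew_mem hx).2⟩)
  omega

def get_reachable_variables_py (start_var : String) (adjacency : List (String × List String)) (reverse : Bool) : List String :=
  loopA adjacency [start_var] (PySem.Set.ofList [start_var]) PySem.Set.empty

-- ===== PORT B =====  (naive fixed-point closure: one full pass over list(known))
-- one pass: for node in list(known): for nb in adjacency.get(node, set()): if unseen, append
-- state = (known, member, changed)
def pvRoundB (adjacency : List (String × List String)) (known member : List String) :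
    List String × List String × Bool :=
  known.foldl
    (fun st node =>
      (pvAdjGet adjacency node).foldl
        (fun (st : List String × List String × Bool) nb =>
          if st.2.1.contains nb then st
          else (st.1 ++ [nb], PySem.Set.add st.2.1 nb, true))
        st)
    (known, member, false)

-- full characterisation of one pass (also needed by loopB's termination proof)
theorem pvRoundB_inner (ns k v : List String) (b : Bool) :
    ns.foldl
      (fun (st : List String × List String × Bool) nb =>
        if st.2.1.contains nb then st
        else (st.1 ++ [nb], PySem.Set.add st.2.1 nb, true))
      (k, v, b)
    = (k ++ pvNew v ns, v ++ pvNew v ns, b || !(pvNew v ns).isEmpty) := by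
  induction ns generalizing k v b with
  | nil => simp [pvNew]
  | cons nb ns ih =>
      simp only [List.foldl_cons, pvNew]
      by_cases h : v.contains nb
      · simp only [h, if_pos]
        exact ih k v b
      · have hnb : nb ∉ v := fun hm => h (List.contains_iff_mem.mpr hm)
        simp only [if_neg h, PySem.Set.add_of_not_mem hnb]
        rw [ih (k ++ [nb]) (v ++ [nb]) true]
        simp [List.append_assoc]

theorem pvIsEmpty_append {α : Type} (l1 l2 : List α) :
    (!(l1 ++ l2).isEmpty) = (!l1.isEmpty || !l2.isEmpty) := by
  cases l1 <;> simp

theorem pvRoundB_char (adjacency : List (String × List String)) (known member : List String) :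
    pvRoundB adjacency known member
      = (known ++ pvNews adjacency member known,
         member ++ pvNews adjacency member known,
         !(pvNews adjacency member known).isEmpty) := by
  simp only [pvRoundB]
  suffices h : ∀ (f k v : List String) (b : Bool),
      f.foldl
        (fun st node =>
          (pvAdjGet adjacency node).foldl
            (fun (st : List String × List String × Bool) nb =>
              if st.2.1.contains nb then st
              else (st.1 ++ [nb], PySem.Set.add st.2.1 nb, true))
            st)
        (k, v, b)
      = (k ++ pvNews adjacency v f, v ++ pvNews adjacency v f,
         b || !(pvNews adjacency v f).isEmpty) by
    simpa using h known known member false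
  intro f
  induction f with
  | nil => intro k v b; simp [pvNews]
  | cons c f ih =>
      intro k v b
      simp only [List.foldl_cons, pvNews, pvRoundB_inner]
      rw [ih]
      simp only [List.append_assoc, pvIsEmpty_append, Bool.or_assoc]

-- the while-changed loop of B: run one full pass; if it added anything, go again
def loopB (adjacency : List (String × List String))
    (known member : List String) : List String :=
  let st := pvRoundB adjacency known member
  if st.2.2 then loopB adjacency st.1 st.2.1
  else PySem.List.slice st.1 (some 1) none     -- known[1:]
termination_by ((pvNodes adjacency).toFinset \ member.toFinset).card
decreasing_by
  rename_i hchanged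
  rw [show st = pvRoundB adjacency known member from rfl, pvRoundB_char] at hchanged
  rw [pvRoundB_char]
  simp only at hchanged ⊢
  have hne : pvNews adjacency member known ≠ [] := by
    intro h; rw [h] at hchanged; simp at hchanged
  have hdrop := pvMeasure_drop (adjacency := adjacency) (v := member)
    (pvNews_nodup adjacency member known)
    (fun x hx => pvNews_mem hx)
  have hlen : 0 < (pvNews adjacency member known).length := List.length_pos_iff.mpr hne
  omega

def get_reachable_variables_py_alt (start_var : String) (adjacency : List (String × List String)) (reverse : Bool) : List String :=
  loopB adjacency [start_var] (PySem.Set.ofList [start_var])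

-- ===== PRECONDITION & SPEC =====
def Spec_get_reachable_variables_py (start_var : String) (adjacency : List (String × List String)) (reverse : Bool) (out : List String) : Prop := out = get_reachable_variables_py_alt start_var adjacency reverse
instance (start_var : String) (adjacency : List (String × List String)) (reverse : Bool) (out : List String) : Decidable (Spec_get_reachable_variables_py start_var adjacency reverse out) := by unfold Spec_get_reachable_variables_py; infer_instance

-- ===== CLAIM (what is proved, stated in full; the proofs are below) =====
def Claim_equal_get_reachable_variables_py : Prop := ∀ (start_var : String) (adjacency : List (String × List String)) (reverse : Bool), Dom_get_reachable_variables_py start_var adjacency reverse → Spec_get_reachable_variables_py start_var adjacency reverse (get_reachable_variables_py start_var adjacency reverse)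

-- ===== LEMMAS AND PROOFS =====

-- one BFS step, fully characterised (needs reachable ⊆ visited)
theorem pvStepA_char (adjacency : List (String × List String)) (c : String)
    (visited reachable queue : List String) (hrv : ∀ x ∈ reachable, x ∈ visited) :
    pvStepA adjacency c visited reachable queue
      = (visited ++ pvNew visited (pvAdjGet adjacency c),
         reachable ++ pvNew visited (pvAdjGet adjacency c),
         queue ++ pvNew visited (pvAdjGet adjacency c)) := by
  simp only [pvStepA]
  generalize pvAdjGet adjacency c = ns
  induction ns generalizing visited reachable queue with
  | nil => simp [pvNew]
  | cons nb ns ih =>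
      simp only [List.foldl_cons, pvNew]
      by_cases h : visited.contains nb
      · simp only [h, if_pos]
        exact ih visited reachable queue hrv
      · have hnb : nb ∉ visited := fun hm => h (List.contains_iff_mem.mpr hm)
        have hnbr : nb ∉ reachable := fun hm => hnb (hrv nb hm)
        have := ih (visited ++ [nb]) (reachable ++ [nb]) (queue ++ [nb])
          (by intro x hx
              rcases List.mem_append.mp hx with hx | hx
              · exact List.mem_append_left _ (hrv x hx)
              · exact List.mem_append_right _ hx)
        simp only [if_neg h, PySem.Set.add_of_not_mem hnb, PySem.Set.add_of_not_mem hnbr]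
        rw [this]
        simp [List.append_assoc]

-- processing the frontier f at the head of A's queue appends exactly pvNews
theorem loopA_frontier (adjacency : List (String × List String)) :
    ∀ (f g visited reachable : List String), (∀ x ∈ reachable, x ∈ visited) →
      loopA adjacency (f ++ g) visited reachable
        = loopA adjacency (g ++ pvNews adjacency visited f)
            (visited ++ pvNews adjacency visited f)
            (reachable ++ pvNews adjacency visited f) := by
  intro f
  induction f with
  | nil => intro g v r _; simp [pvNews]
  | cons c f ih =>
      intro g v r hrv
      have hstep := pvStepA_char adjacency c v r (f ++ g) hrv
      rw [List.cons_append, loopA, hstep]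
      set n := pvNew v (pvAdjGet adjacency c) with hn
      have hrv' : ∀ x ∈ r ++ n, x ∈ v ++ n := by
        intro x hx
        rcases List.mem_append.mp hx with hx | hx
        · exact List.mem_append_left _ (hrv x hx)
        · exact List.mem_append_right _ hx
      have := ih (g ++ n) (v ++ n) (r ++ n) hrv'
      simp only [List.append_assoc] at *
      rw [this]
      simp [pvNews, ← hn]

-- pvNew adds nothing when everything is already visited
theorem pvNew_nil_of_sub {v ns : List String} (h : ∀ x ∈ ns, x ∈ v) :
    pvNew v ns = [] := by
  induction ns with
  | nil => rfl
  | cons nb ns ih =>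
      simp only [pvNew]
      rw [if_pos (List.contains_iff_mem.mpr (h nb List.mem_cons_self))]
      exact ih (fun x hx => h x (List.mem_cons_of_mem _ hx))

-- after a scan of ns, every element of ns is visited
theorem pvNew_covers {v ns : List String} : ∀ x ∈ ns, x ∈ v ++ pvNew v ns := by
  induction ns generalizing v with
  | nil => intro x hx; simp at hx
  | cons nb ns ih =>
      intro x hx
      simp only [pvNew]
      by_cases h : v.contains nb
      · rw [if_pos h]
        rcases List.mem_cons.mp hx with rfl | hx'
        · exact List.mem_append_left _ (List.contains_iff_mem.mp h)
        · exact ih x hx'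
      · rw [if_neg h]
        rcases List.mem_cons.mp hx with rfl | hx'
        · simp
        · have := ih (v := v ++ [nb]) x hx'
          simp only [List.append_assoc, List.mem_append, List.mem_cons] at this ⊢
          simp at this
          tauto

-- already-processed nodes (all neighbours visited) contribute nothing to a pass
theorem pvNews_closed_prefix (adjacency : List (String × List String)) :
    ∀ (p q v : List String), (∀ x ∈ p, ∀ y ∈ pvAdjGet adjacency x, y ∈ v) →
      pvNews adjacency v (p ++ q) = pvNews adjacency v q := by
  intro p
  induction p with
  | nil => intro q v _; rfl
  | cons c p ih =>
      intro q v hcl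
      have h0 : pvNew v (pvAdjGet adjacency c) = [] :=
        pvNew_nil_of_sub (hcl c List.mem_cons_self)
      simp only [List.cons_append, pvNews, h0, List.nil_append, List.append_nil]
      exact ih q v (fun x hx => hcl x (List.mem_cons_of_mem _ hx))

-- after a pass over f, every neighbour of every node of f is visited
theorem pvNews_covers (adjacency : List (String × List String)) :
    ∀ (f v : List String), ∀ x ∈ f, ∀ y ∈ pvAdjGet adjacency x,
      y ∈ v ++ pvNews adjacency v f := by
  intro f
  induction f with
  | nil => intro v x hx; simp at hx
  | cons c f ih =>
      intro v x hx y hy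
      simp only [pvNews]
      set n := pvNew v (pvAdjGet adjacency c) with hn
      rcases List.mem_cons.mp hx with rfl | hx'
      · have := pvNew_covers (v := v) y hy
        rw [← hn] at this
        simp only [List.mem_append] at this ⊢
        tauto
      · have := ih (v ++ n) x hx' y hy
        simp only [List.append_assoc, List.mem_append] at this ⊢
        tauto

-- B's fixed-point loop equals A's BFS loop, under the round invariant:
-- v = p ++ q with p fully processed, v = s :: r (r = discovered in order)
theorem loopB_eq_loopA (adjacency : List (String × List String)) :
    ∀ (m : Nat) (p q r : List String) (s : String),
      ((pvNodes adjacency).toFinset \ (p ++ q).toFinset).card = m →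
      p ++ q = s :: r →
      (∀ x ∈ p, ∀ y ∈ pvAdjGet adjacency x, y ∈ p ++ q) →
      loopB adjacency (p ++ q) (p ++ q) = loopA adjacency q (p ++ q) r := by
  intro m
  induction m using Nat.strong_induction_on with
  | _ m ihm =>
  intro p q r s hm hsr hcl
  set v := p ++ q with hv
  have hrv : ∀ x ∈ r, x ∈ v := by
    intro x hx; rw [hsr]; exact List.mem_cons_of_mem _ hx
  have hnews : pvNews adjacency v v = pvNews adjacency v q := by
    rw [hv]; exact pvNews_closed_prefix adjacency p q (p ++ q) hcl
  set n := pvNews adjacency v q with hnq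
  have hA : loopA adjacency q v r = loopA adjacency n (v ++ n) (r ++ n) := by
    have := loopA_frontier adjacency q [] v r hrv
    simpa [← hnq] using this
  rw [loopB.eq_def, pvRoundB_char, hnews]
  dsimp only
  by_cases hne : n = []
  · rw [hne]
    simp only [List.isEmpty_nil, Bool.not_true, List.append_nil]
    rw [PySem.List.slice_from_one, hA, hne, List.append_nil, loopA, hsr]
    simp
  · rw [if_pos (by simp [hne])]
    have hmem : ∀ x ∈ n, x ∈ pvNodes adjacency ∧ x ∉ v :=
      fun x hx => pvNews_mem (hnq ▸ hx)
    have hnd : n.Nodup := hnq ▸ pvNews_nodup adjacency v q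
    have hdrop := pvMeasure_drop (adjacency := adjacency) (v := v) hnd hmem
    have hlen : 0 < n.length := List.length_pos_iff.mpr hne
    have hlt : ((pvNodes adjacency).toFinset \ (v ++ n).toFinset).card < m := by omega
    have hsr' : v ++ n = s :: (r ++ n) := by rw [hsr]; simp
    have hcl' : ∀ x ∈ v, ∀ y ∈ pvAdjGet adjacency x, y ∈ v ++ n := by
      intro x hx y hy
      rcases List.mem_append.mp (hv ▸ hx) with hxp | hxq
      · exact List.mem_append_left _ (hcl x hxp y hy)
      · have := pvNews_covers adjacency q v x hxq y hy
        rw [← hnq] at this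
        exact this
    have := ihm _ hlt v n (r ++ n) s rfl hsr' hcl'
    rw [this, hA]

-- ===== VERDICT (by name: the statement is the Claim_ definition above) =====
theorem get_reachable_variables_py_spec : Claim_equal_get_reachable_variables_py := by
  intro start_var adjacency reverse _
  unfold Spec_get_reachable_variables_py
  unfold get_reachable_variables_py get_reachable_variables_py_alt
  have hof : PySem.Set.ofList [start_var] = [start_var] := by
    simp [PySem.Set.ofList, PySem.Set.add, PySem.Set.empty]
  rw [hof]
  have := loopB_eq_loopA adjacency
    (((pvNodes adjacency).toFinset \ ([start_var] : List String).toFinset).card)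
    [] [start_var] [] start_var rfl rfl (by intro x hx; simp at hx)
  simp only [List.nil_append] at this
  rw [this]
  simp [PySem.Set.empty]
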